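-- pv_equiv track=rewrite | github.com/Thibault-Mattera/Recommendation_System_Restaurants | scripts/data_preparation.py | replace_cuisines
-- ===== SOURCE A (Python) =====
-- def replace_cuisines(x:list) -> list:
--     to_Italian=['Southern-Italian','Central-Italian','Northern-Italian', 'Neapolitan', 'Campania', 'Tuscan']
--     to_Mexican=['Central American']
--     to_Japanese=['Japanese Fusion','Sushi']
--     to_American=['Native American','South western']
--     to_SouthAmerican=['Argentinean','Chilean', 'Peruvian']
--     to_Indian=['Pakistani', 'Tibetan', 'SriLankan']
--     to_MiddleEastern=['Israeli', 'Lebanese', 'Turkish','Persian','Arabic']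
--     to_Pacific_Islands=['Hawaiian','Polynesian']
--     to_British=['Irish']
--     to_Swiss=['Austrian']
--     to_Chinese_Korean=['Korean','Chinese']
--     to_Mediterranean=['Moroccan','Greek']
--
--     new_list=[]
--     for i in range(len(x)):
--         if x[i][0] in to_Italian:
--             cuisine='Italian'
--         elif x[i][0] in to_Mexican:
--             cuisine='Mexican'
--         elif x[i][0] in to_Japanese:
--             cuisine='Japanese'
--         elif x[i][0] in to_American:
--             cuisine='American'
--         elif x[i][0] in to_SouthAmerican:
--             cuisine='South American'
--         elif x[i][0] in to_Indian:
--             cuisine='Indian'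
--         elif x[i][0] in to_MiddleEastern:
--             cuisine='Middle Eastern'
--         elif x[i][0] in to_Pacific_Islands:
--             cuisine='Pacific Islands'
--         elif x[i][0] in to_British:
--             cuisine='British'
--         elif x[i][0] in to_Swiss:
--             cuisine='Swiss'
--         elif x[i][0] in to_Chinese_Korean:
--             cuisine='Chinese/Korean'
--         elif x[i][0] in to_Mediterranean:
--             cuisine='Mediterranean'
--         else:
--             cuisine=x[i][0]
--         count=x[i][1]
--         new_list.append((cuisine,count))
--
--     return new_list
-- ===== SOURCE B (Python) =====
-- GROUPS = [
--     ('Italian', ['Southern-Italian', 'Central-Italian', 'Northern-Italian', 'Neapolitan', 'Campania', 'Tuscan']),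
--     ('Mexican', ['Central American']),
--     ('Japanese', ['Japanese Fusion', 'Sushi']),
--     ('American', ['Native American', 'South western']),
--     ('South American', ['Argentinean', 'Chilean', 'Peruvian']),
--     ('Indian', ['Pakistani', 'Tibetan', 'SriLankan']),
--     ('Middle Eastern', ['Israeli', 'Lebanese', 'Turkish', 'Persian', 'Arabic']),
--     ('Pacific Islands', ['Hawaiian', 'Polynesian']),
--     ('British', ['Irish']),
--     ('Swiss', ['Austrian']),
--     ('Chinese/Korean', ['Korean', 'Chinese']),
--     ('Mediterranean', ['Moroccan', 'Greek']),
-- ]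
--
-- def replace_cuisines(x: list) -> list:
--     # Column-wise, staged substitution: separate the label column from the count
--     # column, run one whole-column replacement pass per category group (safe:
--     # groups are disjoint and no target category name is a source label), then
--     # zip the columns back together.
--     labels = [item[0] for item in x]
--     counts = [item[1] for item in x]
--     for category, sources in GROUPS:
--         members = set(sources)
--         labels = [category if label in members else label for label in labels]
--     return list(zip(labels, counts))
-- ===== Notes on version B (the rewrite author's own statement) =====
-- stated objective: alternative
-- what changed: A does one per-element pass with a twelve-branch elif cascade; B splits the input into a label column and a count column, runs twelve staged whole-column substitution passes (one per category group, membership via a set) over the labels, and zips the columns back -- correct because groups are disjoint and no target category name is a source label.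
import Mathlib
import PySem

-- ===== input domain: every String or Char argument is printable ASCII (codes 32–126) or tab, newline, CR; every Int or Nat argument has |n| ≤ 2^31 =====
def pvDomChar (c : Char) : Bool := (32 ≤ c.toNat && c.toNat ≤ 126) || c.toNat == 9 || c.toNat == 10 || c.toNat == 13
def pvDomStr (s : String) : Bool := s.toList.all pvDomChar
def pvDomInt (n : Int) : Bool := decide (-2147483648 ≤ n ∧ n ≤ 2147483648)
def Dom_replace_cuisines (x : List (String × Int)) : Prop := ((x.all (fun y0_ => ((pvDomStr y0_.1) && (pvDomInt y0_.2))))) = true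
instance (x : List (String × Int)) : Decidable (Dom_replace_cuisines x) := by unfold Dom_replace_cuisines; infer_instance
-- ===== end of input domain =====

-- B replaces A's per-element twelve-branch elif cascade by column-wise staged substitution: split labels from counts, run one whole-column replacement pass per category group, zip back (alternative decomposition; correct since groups are disjoint and no target name is a source label).


-- ===== PORT A =====
def pvToItalian : List String := ["Southern-Italian", "Central-Italian", "Northern-Italian", "Neapolitan", "Campania", "Tuscan"]
def pvToMexican : List String := ["Central American"]
def pvToJapanese : List String := ["Japanese Fusion", "Sushi"]
def pvToAmerican : List String := ["Native American", "South western"]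
def pvToSouthAmerican : List String := ["Argentinean", "Chilean", "Peruvian"]
def pvToIndian : List String := ["Pakistani", "Tibetan", "SriLankan"]
def pvToMiddleEastern : List String := ["Israeli", "Lebanese", "Turkish", "Persian", "Arabic"]
def pvToPacificIslands : List String := ["Hawaiian", "Polynesian"]
def pvToBritish : List String := ["Irish"]
def pvToSwiss : List String := ["Austrian"]
def pvToChineseKorean : List String := ["Korean", "Chinese"]
def pvToMediterranean : List String := ["Moroccan", "Greek"]

-- A's elif cascade choosing 'cuisine' for one label
def pvLabelA (s : String) : String :=
  if pvToItalian.contains s then "Italian"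
  else if pvToMexican.contains s then "Mexican"
  else if pvToJapanese.contains s then "Japanese"
  else if pvToAmerican.contains s then "American"
  else if pvToSouthAmerican.contains s then "South American"
  else if pvToIndian.contains s then "Indian"
  else if pvToMiddleEastern.contains s then "Middle Eastern"
  else if pvToPacificIslands.contains s then "Pacific Islands"
  else if pvToBritish.contains s then "British"
  else if pvToSwiss.contains s then "Swiss"
  else if pvToChineseKorean.contains s then "Chinese/Korean"
  else if pvToMediterranean.contains s then "Mediterranean"
  else s

-- the loop: new_list = []; for each item append (cuisine, count)
def replace_cuisines (x : List (String × Int)) : List (String × Int) :=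
  x.foldl (fun newList p => newList ++ [(pvLabelA p.1, p.2)]) []

-- ===== PORT B =====
def pvGroups : List (String × List String) := [
  ("Italian", ["Southern-Italian", "Central-Italian", "Northern-Italian", "Neapolitan", "Campania", "Tuscan"]),
  ("Mexican", ["Central American"]),
  ("Japanese", ["Japanese Fusion", "Sushi"]),
  ("American", ["Native American", "South western"]),
  ("South American", ["Argentinean", "Chilean", "Peruvian"]),
  ("Indian", ["Pakistani", "Tibetan", "SriLankan"]),
  ("Middle Eastern", ["Israeli", "Lebanese", "Turkish", "Persian", "Arabic"]),
  ("Pacific Islands", ["Hawaiian", "Polynesian"]),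
  ("British", ["Irish"]),
  ("Swiss", ["Austrian"]),
  ("Chinese/Korean", ["Korean", "Chinese"]),
  ("Mediterranean", ["Moroccan", "Greek"])]

-- one whole-column substitution pass for one group (members = set(sources))
def pvPass (labels : List String) (g : String × List String) : List String :=
  let members : PySem.Set String := PySem.Set.ofList g.2
  labels.map (fun label => if PySem.Set.contains members label then g.1 else label)

def replace_cuisines_alt (x : List (String × Int)) : List (String × Int) :=
  let labels := x.map (fun item => item.1)
  let counts := x.map (fun item => item.2)
  let labels := pvGroups.foldl pvPass labels
  labels.zip counts

-- ===== PRECONDITION & SPEC =====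
def Spec_replace_cuisines (x : List (String × Int)) (out : List (String × Int)) : Prop := out = replace_cuisines_alt x
instance (x : List (String × Int)) (out : List (String × Int)) : Decidable (Spec_replace_cuisines x out) := by unfold Spec_replace_cuisines; infer_instance

-- ===== CLAIM (what is proved, stated in full; the proofs are below) =====
def Claim_equal_replace_cuisines : Prop := ∀ (x : List (String × Int)), Dom_replace_cuisines x → Spec_replace_cuisines x (replace_cuisines x)

-- ===== LEMMAS AND PROOFS =====
-- what one pass does to one label
def pvStep (l : String) (g : String × List String) : String :=
  if PySem.Set.contains (PySem.Set.ofList g.2) l then g.1 else l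

-- what the staged passes do to one label
def pvLabelB (s : String) : String := pvGroups.foldl pvStep s

theorem pvPass_map (ls : List String) (g : String × List String) :
    pvPass ls g = ls.map (fun l => pvStep l g) := rfl

-- folding list-wide passes = mapping the per-element fold
theorem pvFoldl_pass (gs : List (String × List String)) (ls : List String) :
    gs.foldl pvPass ls = ls.map (fun l => gs.foldl pvStep l) := by
  induction gs generalizing ls with
  | nil => simp
  | cons g gs ih => simp [pvPass_map, ih, List.map_map, Function.comp]

theorem pvFoldl_groups (ls : List String) : pvGroups.foldl pvPass ls = ls.map pvLabelB := by
  rw [pvFoldl_pass]; rfl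

-- the cascade and the staged substitution agree on every label
def pvAllSources : List String :=
  ["Southern-Italian", "Central-Italian", "Northern-Italian", "Neapolitan", "Campania", "Tuscan",
   "Central American", "Japanese Fusion", "Sushi", "Native American", "South western",
   "Argentinean", "Chilean", "Peruvian", "Pakistani", "Tibetan", "SriLankan",
   "Israeli", "Lebanese", "Turkish", "Persian", "Arabic", "Hawaiian", "Polynesian",
   "Irish", "Austrian", "Korean", "Chinese", "Moroccan", "Greek"]

set_option maxHeartbeats 1600000 in
theorem pvLabel_eq (s : String) : pvLabelA s = pvLabelB s := by
  by_cases hm : s ∈ pvAllSources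
  · -- the 30 known source labels: one kernel evaluation
    revert hm
    have h : ∀ t ∈ pvAllSources, pvLabelA t = pvLabelB t := by decide
    exact h s
  · -- any other label is fixed by both programs
    simp only [pvAllSources, List.mem_cons, List.not_mem_nil, or_false, not_or] at hm
    obtain ⟨h0, h1, h2, h3, h4, h5, h6, h7, h8, h9, h10, h11, h12, h13, h14, h15, h16, h17,
      h18, h19, h20, h21, h22, h23, h24, h25, h26, h27, h28, h29⟩ := hm
    have e0 : PySem.Set.ofList ["Southern-Italian", "Central-Italian", "Northern-Italian", "Neapolitan", "Campania", "Tuscan"] = ["Southern-Italian", "Central-Italian", "Northern-Italian", "Neapolitan", "Campania", "Tuscan"] := by decide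
    have e1 : PySem.Set.ofList ["Central American"] = ["Central American"] := by decide
    have e2 : PySem.Set.ofList ["Japanese Fusion", "Sushi"] = ["Japanese Fusion", "Sushi"] := by decide
    have e3 : PySem.Set.ofList ["Native American", "South western"] = ["Native American", "South western"] := by decide
    have e4 : PySem.Set.ofList ["Argentinean", "Chilean", "Peruvian"] = ["Argentinean", "Chilean", "Peruvian"] := by decide
    have e5 : PySem.Set.ofList ["Pakistani", "Tibetan", "SriLankan"] = ["Pakistani", "Tibetan", "SriLankan"] := by decide
    have e6 : PySem.Set.ofList ["Israeli", "Lebanese", "Turkish", "Persian", "Arabic"] = ["Israeli", "Lebanese", "Turkish", "Persian", "Arabic"] := by decide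
    have e7 : PySem.Set.ofList ["Hawaiian", "Polynesian"] = ["Hawaiian", "Polynesian"] := by decide
    have e8 : PySem.Set.ofList ["Irish"] = ["Irish"] := by decide
    have e9 : PySem.Set.ofList ["Austrian"] = ["Austrian"] := by decide
    have e10 : PySem.Set.ofList ["Korean", "Chinese"] = ["Korean", "Chinese"] := by decide
    have e11 : PySem.Set.ofList ["Moroccan", "Greek"] = ["Moroccan", "Greek"] := by decide
    simp [pvLabelA, pvLabelB, pvGroups, pvStep, pvToItalian, pvToMexican, pvToJapanese,
          pvToAmerican, pvToSouthAmerican, pvToIndian, pvToMiddleEastern, pvToPacificIslands,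
          pvToBritish, pvToSwiss, pvToChineseKorean, pvToMediterranean,
          e0, e1, e2, e3, e4, e5, e6, e7, e8, e9, e10, e11, PySem.Set.contains,
          h0, h1, h2, h3, h4, h5, h6, h7, h8, h9, h10, h11, h12, h13, h14, h15, h16, h17, h18,
          h19, h20, h21, h22, h23, h24, h25, h26, h27, h28, h29]

-- ===== VERDICT (by name: the statement is the Claim_ definition above) =====
theorem replace_cuisines_spec : Claim_equal_replace_cuisines := by
  intro x _
  unfold Spec_replace_cuisines replace_cuisines replace_cuisines_alt
  rw [PySem.List.foldl_append_singleton_eq_map]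
  simp only [List.nil_append, pvFoldl_groups, List.map_map, Function.comp_def, List.zip_map']
  exact List.map_congr_left (fun p _ => by rw [pvLabel_eq])
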